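-- pv_equiv track=rewrite | github.com/mo9mo9-uwu-mo9mo9/Kumihan-Formatter | kumihan_formatter/core/parsing/main_parser.py | _extract_complete_elements
-- ===== SOURCE A (Python) =====
-- def _extract_complete_elements(buffer: str) -> tuple[list[str], str]:
--     """バッファから完全な構文要素を抽出"""
--     elements = []
--
--     # ブロック要素の抽出（## で終わる）
--     parts = buffer.split("##")
--
--     if len(parts) > 1:
--         # 最後以外は完全なブロック
--         for i in range(len(parts) - 1):
--             if i == 0:
--                 elements.append(parts[i] + "##")
--             else:
--                 elements.append("##" + parts[i] + "##")
--
--         remaining = parts[-1]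
--     else:
--         remaining = buffer
--
--     return elements, remaining
-- ===== SOURCE B (Python) =====
-- def _extract_complete_elements(buffer: str) -> tuple[list[str], str]:
--     """Single find-driven scan over a shrinking suffix instead of split + index loop."""
--     elements = []
--     rest = buffer
--     first = True
--     while True:
--         idx = rest.find("##")
--         if idx == -1:
--             return elements, rest
--         seg = rest[:idx]
--         elements.append((seg if first else "##" + seg) + "##")
--         first = False
--         rest = rest[idx + 2:]
-- ===== Notes on version B (the rewrite author's own statement) =====
-- stated objective: alternative
-- what changed: Replaces split('##') plus an index loop over the parts list by a single find-driven scan that repeatedly locates the next '##' in the remaining suffix, emits each element immediately, and keeps the unscanned suffix as the remainder.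
import Mathlib
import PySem

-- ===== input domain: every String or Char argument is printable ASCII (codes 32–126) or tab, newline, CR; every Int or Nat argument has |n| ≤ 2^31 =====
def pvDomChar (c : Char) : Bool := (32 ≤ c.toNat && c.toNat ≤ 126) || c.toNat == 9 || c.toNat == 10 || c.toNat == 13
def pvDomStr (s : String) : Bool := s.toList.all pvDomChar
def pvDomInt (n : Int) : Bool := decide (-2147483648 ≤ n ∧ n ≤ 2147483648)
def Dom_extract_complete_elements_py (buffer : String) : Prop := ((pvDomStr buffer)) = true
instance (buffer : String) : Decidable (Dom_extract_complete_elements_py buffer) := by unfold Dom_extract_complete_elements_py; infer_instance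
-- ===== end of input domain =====

-- B replaces A's split("##") + index loop over the parts with a single find-driven scan of a shrinking suffix (alternative decomposition, same asymptotic cost).


-- ===== PORT A =====
-- parts = buffer.split("##"); first part gets a trailing "##", later parts are wrapped "##…##"; last part is the remainder.
def extract_complete_elements_py (buffer : String) : List String × String :=
  let parts := PySem.Chars.splitOn buffer.toList ['#', '#']
  if 1 < parts.length then
    let elements := (PySem.List.pyRange 0 ((parts.length : Int) - 1) 1).foldl
      (fun elements i =>
        if i = 0 then
          elements ++ [String.ofList (PySem.List.pyGetD parts i [] ++ ['#', '#'])]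
        else
          elements ++ [String.ofList (['#', '#'] ++ PySem.List.pyGetD parts i [] ++ ['#', '#'])])
      []
    (elements, String.ofList (PySem.List.pyGetD parts (-1) []))
  else
    ([], buffer)

-- ===== PORT B =====
-- termination fact for pvBGo's loop (cited by name in decreasing_by): the suffix rest[idx+2:] is strictly shorter
theorem pvBGo_dec (rest : List Char) (h : ¬ PySem.Chars.find rest ['#', '#'] = -1) :
    (PySem.List.slice rest (some (PySem.Chars.find rest ['#', '#'] + 2)) none).length < rest.length := by
  have h0 : -1 ≤ PySem.Chars.find rest ['#', '#'] := PySem.Chars.neg_one_le_find rest _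
  have hne : rest ≠ [] := by intro he; subst he; exact h (by decide)
  rw [PySem.List.slice_from rest (by omega)]
  have : 0 < rest.length := List.length_pos_iff.mpr hne
  simp only [List.length_drop]
  omega

-- B's while loop: rest.find("##"); break on -1; emit rest[:idx] (+ wrapping); continue on rest[idx+2:]
def pvBGo (rest : List Char) (first : Bool) (elements : List String) : List String × String :=
  if h : PySem.Chars.find rest ['#', '#'] = -1 then
    (elements, String.ofList rest)
  else
    let idx := PySem.Chars.find rest ['#', '#']
    let seg := PySem.List.slice rest none (some idx)       -- rest[:idx]
    pvBGo (PySem.List.slice rest (some (idx + 2)) none)    -- rest[idx+2:]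
      false
      (elements ++ [String.ofList ((if first then seg else ['#', '#'] ++ seg) ++ ['#', '#'])])
termination_by rest.length
decreasing_by exact pvBGo_dec rest h

def extract_complete_elements_py_alt (buffer : String) : List String × String :=
  pvBGo buffer.toList true []

-- ===== PRECONDITION & SPEC =====
def Spec_extract_complete_elements_py (buffer : String) (out : List String × String) : Prop := out = extract_complete_elements_py_alt buffer
instance (buffer : String) (out : List String × String) : Decidable (Spec_extract_complete_elements_py buffer out) := by unfold Spec_extract_complete_elements_py; infer_instance

-- ===== CLAIM (what is proved, stated in full; the proofs are below) =====
def Claim_equal_extract_complete_elements_py : Prop := ∀ (buffer : String), Dom_extract_complete_elements_py buffer → Spec_extract_complete_elements_py buffer (extract_complete_elements_py buffer)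

-- ===== LEMMAS AND PROOFS =====

-- common reference: the '##'-separated pieces of l, by first-occurrence recursion
def pvPieces (l : List Char) : List (List Char) :=
  if h : PySem.Chars.find l ['#', '#'] = -1 then [l]
  else
    (l.take (PySem.Chars.find l ['#', '#']).toNat) ::
      pvPieces (l.drop ((PySem.Chars.find l ['#', '#']).toNat + 2))
termination_by l.length
decreasing_by
  have h0 : -1 ≤ PySem.Chars.find l ['#', '#'] := PySem.Chars.neg_one_le_find l _
  have hne : l ≠ [] := by intro he; subst he; exact h (by decide)
  have : 0 < l.length := List.length_pos_iff.mpr hne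
  simp only [List.length_drop]
  omega

-- the elements both programs emit, from the pieces (every piece but the last becomes an element)
def pvEmit : List (List Char) → Bool → List String
  | [], _ => []
  | [_], _ => []
  | p :: q :: qs, first =>
    String.ofList ((if first then p else ['#', '#'] ++ p) ++ ['#', '#']) :: pvEmit (q :: qs) false

theorem pvGo_ge (sub : List Char) : ∀ (l : List Char) (k : Nat),
    PySem.Chars.find.go sub l k = -1 ∨ (k : Int) ≤ PySem.Chars.find.go sub l k := by
  intro l; induction l with
  | nil => intro k; simp only [PySem.Chars.find.go]; split <;> simp
  | cons c rest ih =>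
    intro k; simp only [PySem.Chars.find.go]; split
    · right; simp
    · rcases ih (k+1) with h | h
      · left; exact h
      · right; omega

theorem pvGoShift (sub : List Char) : ∀ (l : List Char) (k : Nat),
    PySem.Chars.find.go sub l k =
      if PySem.Chars.find.go sub l 0 = -1 then -1 else PySem.Chars.find.go sub l 0 + k := by
  intro l; induction l with
  | nil => intro k; simp only [PySem.Chars.find.go]; split <;> simp
  | cons c rest ih =>
    intro k; simp only [PySem.Chars.find.go]; split
    · simp
    · rw [ih (k+1), ih 1]
      split
      · simp
      · rename_i h
        have : (0:Int) ≤ PySem.Chars.find.go sub rest 0 := by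
          rcases pvGo_ge sub rest 0 with h0 | h0
          · exact absurd h0 h
          · exact_mod_cast h0
        have h1 : ¬ PySem.Chars.find.go sub rest 0 + 1 = -1 := by omega
        simp [h1]; omega

theorem pvFind_cons (c : Char) (rest : List Char) :
    PySem.Chars.find (c :: rest) ['#', '#'] =
      if List.isPrefixOf ['#', '#'] (c :: rest) then 0
      else if PySem.Chars.find rest ['#', '#'] = -1 then -1
      else PySem.Chars.find rest ['#', '#'] + 1 := by
  show PySem.Chars.find.go _ _ 0 = _
  rw [PySem.Chars.find.go]; split
  · rfl
  · rw [pvGoShift]; rfl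

theorem pvPieces_ne_nil (l : List Char) : pvPieces l ≠ [] := by
  rw [pvPieces]; split <;> simp

theorem pvPieces_pos (l : List Char) (h : ¬ PySem.Chars.find l ['#', '#'] = -1) :
    pvPieces l = (l.take (PySem.Chars.find l ['#', '#']).toNat) ::
      pvPieces (l.drop ((PySem.Chars.find l ['#', '#']).toNat + 2)) := by
  rw [pvPieces, dif_neg h]

theorem pvPieces_neg (l : List Char) (h : PySem.Chars.find l ['#', '#'] = -1) :
    pvPieces l = [l] := by
  rw [pvPieces, dif_pos h]

theorem pvPieces_cons_exists (l : List Char) : ∃ p ps, pvPieces l = p :: ps := by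
  cases hp : pvPieces l with
  | nil => exact absurd hp (pvPieces_ne_nil l)
  | cons p ps => exact ⟨p, ps, rfl⟩

theorem pvSplitGo : ∀ (fuel : Nat) (l cur : List Char) (acc : List (List Char)), l.length < fuel →
    PySem.Chars.splitOn.go ['#', '#'] fuel l cur acc
      = acc.reverse ++ (cur.reverse ++ (pvPieces l).headI) :: (pvPieces l).tail := by
  intro fuel
  induction fuel with
  | zero => intro l cur acc h; omega
  | succ fuel ih =>
    intro l cur acc h
    cases l with
    | nil =>
      rw [PySem.Chars.splitOn.go]
      · rw [pvPieces_neg [] (by decide)]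
        simp
      · omega
    | cons c rest =>
      rw [PySem.Chars.splitOn.go]
      split
      · rename_i hp
        have hf : PySem.Chars.find (c :: rest) ['#', '#'] = 0 := by
          rw [pvFind_cons, if_pos hp]
        rw [ih _ _ _ (by simp at h ⊢; omega : (List.drop (['#','#'] : List Char).length (c :: rest)).length < fuel)]
        rw [pvPieces_pos (c :: rest) (by rw [hf]; decide)]
        simp only [hf, show (['#','#'] : List Char).length = 2 from rfl, Int.toNat_zero, List.take_zero]
        obtain ⟨p, ps, hd⟩ := pvPieces_cons_exists (List.drop 2 (c :: rest))
        rw [hd]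
        simp
      · rename_i hp
        rw [ih rest (c :: cur) acc (by simp at h ⊢; omega)]
        have hf := pvFind_cons c rest
        rw [if_neg hp] at hf
        by_cases hr : PySem.Chars.find rest ['#', '#'] = -1
        · rw [if_pos hr] at hf
          rw [pvPieces_neg (c :: rest) hf, pvPieces_neg rest hr]
          simp
        · rw [if_neg hr] at hf
          have h0 : (0:Int) ≤ PySem.Chars.find rest ['#', '#'] := by
            have := PySem.Chars.neg_one_le_find rest ['#', '#']; omega
          rw [pvPieces_pos (c :: rest) (by rw [hf]; omega), pvPieces_pos rest hr]
          have ht : (PySem.Chars.find (c :: rest) ['#', '#']).toNat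
              = (PySem.Chars.find rest ['#', '#']).toNat + 1 := by rw [hf]; omega
          have ht3 : (PySem.Chars.find rest ['#', '#']).toNat + 1 + 2
              = ((PySem.Chars.find rest ['#', '#']).toNat + 2) + 1 := by omega
          simp [ht, ht3, List.take_succ_cons, List.drop_succ_cons]

theorem pvSplitOn_eq (l : List Char) :
    PySem.Chars.splitOn l ['#', '#'] = pvPieces l := by
  show PySem.Chars.splitOn.go _ _ _ _ _ = _
  rw [pvSplitGo (l.length + 1) l [] [] (by omega)]
  obtain ⟨p, ps, hd⟩ := pvPieces_cons_exists l
  rw [hd]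
  simp

theorem pvBGo_eq (l : List Char) : ∀ (first : Bool) (es : List String),
    pvBGo l first es = (es ++ pvEmit (pvPieces l) first, String.ofList ((pvPieces l).getLastD [])) := by
  induction hn : l.length using Nat.strong_induction_on generalizing l with
  | _ n ih =>
  intro first es
  rw [pvBGo]
  by_cases h : PySem.Chars.find l ['#', '#'] = -1
  · rw [dif_pos h, pvPieces_neg l h]
    simp [pvEmit]
  · rw [dif_neg h]
    have h0 : (0:Int) ≤ PySem.Chars.find l ['#', '#'] := by
      have := PySem.Chars.neg_one_le_find l ['#', '#']; omega
    have hlen := pvBGo_dec l h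
    rw [ih _ (by omega) _ rfl]
    rw [PySem.List.slice_from l (by omega), PySem.List.slice_to l h0]
    rw [pvPieces_pos l h]
    have ht : (PySem.Chars.find l ['#', '#'] + 2).toNat
        = (PySem.Chars.find l ['#', '#']).toNat + 2 := by omega
    rw [ht]
    obtain ⟨p, ps, hd⟩ := pvPieces_cons_exists (List.drop ((PySem.Chars.find l ['#', '#']).toNat + 2) l)
    rw [hd]
    cases first <;> simp [pvEmit]

theorem pvGetD_neg_one {α : Type} (xs : List α) (d : α) (h : xs ≠ []) :
    PySem.List.pyGetD xs (-1) d = xs.getLastD d := by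
  have hl : 0 < xs.length := List.length_pos_iff.mpr h
  simp only [PySem.List.pyGetD, PySem.List.pyGet?, PySem.List.pyIdx?]
  rw [if_neg (by omega), if_pos (by exact_mod_cast by omega : -(xs.length : Int) ≤ -1)]
  simp only [Option.bind_some]
  have : (-(-1:Int)).toNat = 1 := by decide
  rw [this]
  rw [List.getElem?_eq_getElem (by omega), Option.getD_some,
      List.getLastD_eq_getLast?, List.getLast?_eq_getElem?,
      List.getElem?_eq_getElem (by omega), Option.getD_some]

theorem pvEmit_tail : ∀ (qs : List (List Char)) (q : List Char),
    pvEmit (q :: qs) false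
      = ((q :: qs).dropLast).map (fun p => String.ofList (['#', '#'] ++ p ++ ['#', '#'])) := by
  intro qs
  induction qs with
  | nil => intro q; simp [pvEmit]
  | cons q' qs ih => intro q; simp [pvEmit, ih q']

theorem pvPieces_singleton (l p : List Char) (h : pvPieces l = [p]) : p = l := by
  rw [pvPieces] at h
  split at h
  · simpa using h.symm
  · exfalso
    obtain ⟨p', ps', hd⟩ := pvPieces_cons_exists (List.drop ((PySem.Chars.find l ['#', '#']).toNat + 2) l)
    rw [hd] at h
    simp at h

theorem pvA_eq (buffer : String) :
    extract_complete_elements_py buffer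
      = (pvEmit (pvPieces buffer.toList) true, String.ofList ((pvPieces buffer.toList).getLastD [])) := by
  simp only [extract_complete_elements_py, pvSplitOn_eq]
  obtain ⟨p, ps, hd⟩ := pvPieces_cons_exists buffer.toList
  cases ps with
  | nil =>
    rw [hd, if_neg (by simp)]
    have hp : p = buffer.toList := pvPieces_singleton _ _ hd
    subst hp
    simp [pvEmit, String.ofList_toList]
  | cons q qs =>
    rw [hd, if_pos (by simp)]
    set parts := p :: q :: qs with hparts
    have hlp : (parts.length : Int) = (qs.length : Int) + 2 := by simp [hparts]; omega
    have hdll : ((parts.dropLast.length : Nat) : Int) = (parts.length : Int) - 1 := by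
      simp [hparts]
    have hlast : PySem.List.pyGetD parts (-1) [] = parts.getLastD [] :=
      pvGetD_neg_one parts [] (by simp [hparts])
    rw [hlast]
    refine Prod.ext ?_ (by simp)
    show _ = pvEmit parts true
    rw [PySem.List.pyRange_one_cons (by omega)]
    simp only [List.foldl_cons, List.nil_append, zero_add]
    simp only [if_true]
    have hp0 : PySem.List.pyGetD parts 0 [] = p := by
      rw [PySem.List.pyGetD_eq_getElem parts [] (by omega) (by omega)]
      simp [hparts]
    rw [hp0]
    rw [PySem.List.foldl_congr_mem _ _
      (fun acc i => acc ++ [String.ofList (['#', '#'] ++ PySem.List.pyGetD parts.dropLast i [] ++ ['#', '#'])]) _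
      (by
        intro acc x hx
        rw [PySem.List.mem_pyRange_one] at hx
        rw [if_neg (by omega)]
        have hx1 : PySem.List.pyGetD parts x [] = PySem.List.pyGetD parts.dropLast x [] := by
          rw [PySem.List.pyGetD_eq_getElem parts [] (by omega) (by omega),
              PySem.List.pyGetD_eq_getElem parts.dropLast [] (by omega) (by omega)]
          rw [List.getElem_dropLast]
        rw [hx1])]
    rw [PySem.List.foldl_append_singleton_eq_map]
    have hb : ((parts.length : Int) - 1) = PySem.List.len parts.dropLast := by
      rw [PySem.List.len_eq, hdll]
    rw [hb]
    have hmm : (PySem.List.pyRange 1 (PySem.List.len parts.dropLast)).map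
        (fun i => String.ofList (['#', '#'] ++ PySem.List.pyGetD parts.dropLast i [] ++ ['#', '#']))
        = ((PySem.List.pyRange 1 (PySem.List.len parts.dropLast)).map
            (fun j => PySem.List.pyGetD parts.dropLast j [])).map
          (fun s => String.ofList (['#', '#'] ++ s ++ ['#', '#'])) := by
      rw [List.map_map]; rfl
    rw [hmm, PySem.List.map_pyGetD_pyRange parts.dropLast [] (by omega)]
    have hdl : parts.dropLast.drop (1:Int).toNat = (q :: qs).dropLast := by
      simp [hparts]
    rw [hdl, hparts]
    simp only [pvEmit, pvEmit_tail]
    simp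

-- ===== VERDICT (by name: the statement is the Claim_ definition above) =====
theorem extract_complete_elements_py_spec : Claim_equal_extract_complete_elements_py := by
  intro buffer _
  unfold Spec_extract_complete_elements_py extract_complete_elements_py_alt
  rw [pvA_eq, pvBGo_eq]
  simp
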